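-- pv_equiv track=rewrite | github.com/dangthiminhnguyet/Rosalind | Bioinformatics Stronghold/3. Complementing a Strand of DNA.py | cdna
-- ===== SOURCE A (Python) =====
-- def cdna(dna):
--     rc_dna = ""
--     for c in dna:
--         if c == "A":
--             rc_dna += "T"
--         elif c == "T":
--             rc_dna += "A"
--         elif c == "G":
--             rc_dna += "C"
--         else:
--             rc_dna += "G"
--     c_dna = ""
--     i = len(rc_dna) - 1
--     while i>=0:
--         c_dna = c_dna + rc_dna[i]
--         i = i - 1
--     return c_dna
-- ===== SOURCE B (Python) =====
-- def cdna(dna):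
--     comp = {'A': 'T', 'T': 'A', 'G': 'C'}
--     return "".join(comp.get(c, 'G') for c in reversed(dna))
-- ===== Notes on version B (the rewrite author's own statement) =====
-- stated objective: simpler
-- what changed: Single reverse-order pass joining table-mapped characters via str.join, instead of building a forward complement string by repeated concatenation and then reversing it with an index while-loop.
import Mathlib
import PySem

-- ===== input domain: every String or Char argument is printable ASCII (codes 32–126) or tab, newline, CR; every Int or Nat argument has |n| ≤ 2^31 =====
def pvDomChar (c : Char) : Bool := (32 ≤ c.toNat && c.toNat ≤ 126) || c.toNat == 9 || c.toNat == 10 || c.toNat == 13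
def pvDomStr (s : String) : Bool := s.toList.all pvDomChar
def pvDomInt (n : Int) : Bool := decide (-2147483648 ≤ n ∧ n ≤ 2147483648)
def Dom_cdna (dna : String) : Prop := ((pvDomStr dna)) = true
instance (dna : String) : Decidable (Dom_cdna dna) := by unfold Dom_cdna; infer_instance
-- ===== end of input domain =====

-- B computes the reverse complement in one reverse-order pass over the input with a
-- complement table (default 'G'), instead of A's two passes (build the forward
-- complement string, then reverse it with an index while-loop). Objective: simpler.

-- ===== PORT A =====
-- the while loop 'while i >= 0: c_dna = c_dna + rc_dna[i]; i = i - 1', with i+1 as the Nat counter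
def cdnaWhile (rc : List Char) : Nat → List Char → List Char
  | 0, acc => acc
  | n + 1, acc => cdnaWhile rc n (acc ++ [rc.getD n ' '])

def cdna (dna : String) : String :=
  let rc_dna := dna.toList.foldl (fun acc c =>
    if c = 'A' then acc ++ ['T']
    else if c = 'T' then acc ++ ['A']
    else if c = 'G' then acc ++ ['C']
    else acc ++ ['G']) []
  String.mk (cdnaWhile rc_dna rc_dna.length [])

-- ===== PORT B =====
def cdna_alt (dna : String) : String :=
  let comp : PySem.Dict Char Char := PySem.Dict.ofList [('A', 'T'), ('T', 'A'), ('G', 'C')]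
  String.mk (dna.toList.reverse.map (fun c => comp.getD c 'G'))

-- ===== PRECONDITION & SPEC =====
def Spec_cdna (dna : String) (out : String) : Prop := out = cdna_alt dna
instance (dna : String) (out : String) : Decidable (Spec_cdna dna out) := by unfold Spec_cdna; infer_instance

-- ===== CLAIM (what is proved, stated in full; the proofs are below) =====
def Claim_equal_cdna : Prop := ∀ (dna : String), Dom_cdna dna → Spec_cdna dna (cdna dna)

-- ===== LEMMAS AND PROOFS =====
def pvComp (c : Char) : Char :=
  (PySem.Dict.ofList [('A', 'T'), ('T', 'A'), ('G', 'C')]).getD c 'G'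

lemma pvComp_eq (c : Char) :
    pvComp c = (if c = 'A' then 'T' else if c = 'T' then 'A' else if c = 'G' then 'C' else 'G') := by
  have hd : PySem.Dict.ofList [('A', 'T'), ('T', 'A'), ('G', 'C')]
      = PySem.Dict.mk [('A', 'T'), ('T', 'A'), ('G', 'C')] := by decide
  by_cases h1 : c = 'A'
  · subst h1; decide
  by_cases h2 : c = 'T'
  · subst h2; decide
  by_cases h3 : c = 'G'
  · subst h3; decide
  simp only [pvComp, hd, PySem.Dict.getD_eq_get?_getD, PySem.Dict.get?_mk_cons,
    beq_iff_eq, if_neg (Ne.symm h1), if_neg (Ne.symm h2), if_neg (Ne.symm h3), h1, h2, h3,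
    if_false]
  simp [PySem.Dict.get?]

lemma cdna_foldl (l acc : List Char) :
    l.foldl (fun acc c =>
      if c = 'A' then acc ++ ['T']
      else if c = 'T' then acc ++ ['A']
      else if c = 'G' then acc ++ ['C']
      else acc ++ ['G']) acc = acc ++ l.map pvComp := by
  induction l generalizing acc with
  | nil => simp
  | cons c l ih =>
    simp only [List.foldl_cons, List.map_cons, ih, pvComp_eq]
    split_ifs <;> simp

lemma cdnaWhile_eq (rc : List Char) (n : Nat) (acc : List Char) (hn : n ≤ rc.length) :
    cdnaWhile rc n acc = acc ++ (rc.take n).reverse := by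
  induction n generalizing acc with
  | zero => simp [cdnaWhile]
  | succ n ih =>
    rw [cdnaWhile, ih _ (by omega)]
    have h : n < rc.length := by omega
    have hg : rc.getD n ' ' = rc[n] := List.getD_eq_getElem rc ' ' h
    rw [hg, List.take_add_one, List.getElem?_eq_getElem h]
    simp only [Option.toList_some, List.reverse_append, List.reverse_cons, List.reverse_nil,
      List.nil_append, List.singleton_append, List.append_assoc]

-- ===== VERDICT (by name: the statement is the Claim_ definition above) =====
theorem cdna_spec : Claim_equal_cdna := by
  intro dna _
  show cdna dna = cdna_alt dna
  simp only [cdna, cdna_alt, cdna_foldl, List.nil_append]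
  rw [cdnaWhile_eq _ _ _ (by simp)]
  have hf : (fun c => (PySem.Dict.ofList [('A', 'T'), ('T', 'A'), ('G', 'C')]).getD c 'G') = pvComp := rfl
  rw [hf]
  simp [List.take_of_length_le]
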